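-- pv_equiv track=rewrite | github.com/PMRAZOR/Baekjoon-Solved | 백준/Gold/17609. 회문/회문.py | solution
-- ===== SOURCE A (Python) =====
-- def is_palindrome(arr, left, right):
--     while left < right:
--         if arr[left] != arr[right]:
--             return False
--         left += 1
--         right -= 1
--     return True
--
-- def solution(s):
--     left = 0
--     right = len(s) - 1
--
--     while left < right:
--         if s[left] != s[right]:
--             skip_left = is_palindrome(s, left + 1, right)
--             skip_right = is_palindrome(s, left, right - 1)
--
--             if skip_left or skip_right:
--                 return 1
--             else:
--                 return 2
--         left += 1
--         right -= 1
--
--     return 0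
-- ===== SOURCE B (Python) =====
-- def check(t):
--     return t == t[::-1]
--
-- def solution(s):
--     t = s
--     while len(t) > 1 and t[0] == t[-1]:
--         t = t[1:-1]
--     if len(t) <= 1:
--         return 0
--     return 1 if check(t[1:]) or check(t[:-1]) else 2
-- ===== Notes on version B (the rewrite author's own statement) =====
-- stated objective: simpler
-- what changed: Replaces A's index-passing helper and two-pointer loops by peeling matched end characters off the string itself and testing the two drop-one candidates for palindromicity with a slice-reversal comparison t == t[::-1].
import Mathlib
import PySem

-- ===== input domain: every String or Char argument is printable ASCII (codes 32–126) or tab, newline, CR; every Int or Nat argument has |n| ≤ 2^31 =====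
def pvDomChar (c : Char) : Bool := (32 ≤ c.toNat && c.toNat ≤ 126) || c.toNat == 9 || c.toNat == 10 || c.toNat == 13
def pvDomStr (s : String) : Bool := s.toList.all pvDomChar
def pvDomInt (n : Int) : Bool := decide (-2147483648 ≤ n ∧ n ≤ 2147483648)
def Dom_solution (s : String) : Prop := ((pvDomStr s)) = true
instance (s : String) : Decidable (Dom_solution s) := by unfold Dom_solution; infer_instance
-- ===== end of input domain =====

-- B replaces A's index-passing helper and per-character loops by substring peeling and
-- slice-reversal palindrome tests (objective: simpler).

-- ===== PORT A =====
-- is_palindrome(arr, left, right): A's inner two-pointer scan, indices kept as Ints as in Python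
def isPalindromeA (arr : List Char) (left right : Int) : Bool :=
  if left < right then
    if PySem.List.pyGet? arr left ≠ PySem.List.pyGet? arr right then false
    else isPalindromeA arr (left + 1) (right - 1)
  else true
termination_by (right - left).toNat
decreasing_by omega

-- the while-loop of A's solution
def solutionLoopA (s : List Char) (left right : Int) : Int :=
  if left < right then
    if PySem.List.pyGet? s left ≠ PySem.List.pyGet? s right then
      if isPalindromeA s (left + 1) right || isPalindromeA s left (right - 1) then 1 else 2
    else solutionLoopA s (left + 1) (right - 1)
  else 0
termination_by (right - left).toNat
decreasing_by omega

def solution (s : String) : Int :=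
  solutionLoopA s.toList 0 ((s.toList.length : Int) - 1)

-- ===== PORT B =====
-- check(t): t == t[::-1]
def checkB (t : List Char) : Bool := t == (PySem.List.slice? t none none (-1)).getD []

-- while len(t) > 1 and t[0] == t[-1]: t = t[1:-1]
def peelB (t : List Char) : List Char :=
  if 1 < t.length ∧ PySem.List.pyGet? t 0 = PySem.List.pyGet? t (-1) then
    peelB (PySem.List.slice t (some 1) (some (-1)))
  else t
termination_by t.length
decreasing_by
  rename_i h
  obtain ⟨h1, -⟩ := h
  have ht : t ≠ [] := List.ne_nil_of_length_pos (by omega)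
  simp [PySem.List.length_slice, PySem.List.clampIdx, ht]
  omega

def solution_alt (s : String) : Int :=
  let t := peelB s.toList
  if t.length ≤ 1 then 0
  else if checkB (PySem.List.slice t (some 1) none) || checkB (PySem.List.slice t none (some (-1))) then 1 else 2

-- ===== PRECONDITION & SPEC =====
def Spec_solution (s : String) (out : Int) : Prop := out = solution_alt s
instance (s : String) (out : Int) : Decidable (Spec_solution s out) := by unfold Spec_solution; infer_instance

-- ===== CLAIM (what is proved, stated in full; the proofs are below) =====
def Claim_equal_solution : Prop := ∀ (s : String), Dom_solution s → Spec_solution s (solution s)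

-- ===== LEMMAS AND PROOFS =====

-- the substring s[l : r+1] both programs talk about
def pvCore (arr : List Char) (l r : Nat) : List Char := (arr.drop l).take (r + 1 - l)

-- the tail of B's program applied to the current peeled substring
def pvFinishB (t : List Char) : Int :=
  if t.length ≤ 1 then 0
  else if checkB (PySem.List.slice t (some 1) none) || checkB (PySem.List.slice t none (some (-1))) then 1 else 2

lemma drop_get (arr : List Char) (l k r : Nat) (hk : l + k = r) (hr : r < arr.length) :
    (arr.drop l)[k]? = some arr[r] := by
  rw [List.getElem?_drop]
  have h : l + k < arr.length := by omega
  rw [List.getElem?_eq_getElem h]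
  subst hk
  rfl

lemma pvCore_decomp (arr : List Char) (l r : Nat) (h : l < r) (hr : r < arr.length) :
    pvCore arr l r = arr[l] :: (pvCore arr (l + 1) (r - 1) ++ [arr[r]]) := by
  unfold pvCore
  have h1 : r + 1 - l = (r - l - 1 + 1) + 1 := by omega
  rw [List.drop_eq_getElem_cons (show l < arr.length by omega), h1, List.take_succ_cons,
    List.take_add_one, drop_get arr (l+1) (r-l-1) r (by omega) hr]
  have h2 : r - 1 + 1 - (l + 1) = r - l - 1 := by omega
  simp [h2]

lemma pvCore_length (arr : List Char) (l r : Nat) (hr : r < arr.length) :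
    (pvCore arr l r).length = r + 1 - l := by
  simp [pvCore]; omega

lemma short_pal (t : List Char) (h : t.length ≤ 1) : t = t.reverse := by
  match t with
  | [] => rfl
  | [a] => rfl
  | a :: b :: u => simp at h

lemma getA (arr : List Char) (l : Nat) (h : l < arr.length) :
    PySem.List.pyGet? arr (l : Int) = some arr[l] := by
  simp [PySem.List.pyGet?_natCast, List.getElem?_eq_getElem h]

lemma pal_eq (arr : List Char) : ∀ (m l r : Nat), r + 1 - l ≤ m → r < arr.length →
    isPalindromeA arr l r = decide (pvCore arr l r = (pvCore arr l r).reverse) := by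
  intro m
  induction m with
  | zero =>
    intro l r hm hr
    rw [isPalindromeA, if_neg (by exact_mod_cast (show ¬ (l:Int) < r by omega))]
    have h1 : (pvCore arr l r).length ≤ 1 := by rw [pvCore_length arr l r hr]; omega
    simp [← short_pal _ h1]
  | succ m ih =>
    intro l r hm hr
    by_cases hlr : l < r
    · rw [isPalindromeA, if_pos (by exact_mod_cast hlr)]
      rw [getA arr l (by omega), getA arr r hr]
      by_cases hab : arr[l] = arr[r]
      · rw [if_neg (by simp [hab]), show (l:Int) + 1 = ((l+1 : Nat):Int) by omega,
          show (r:Int) - 1 = ((r-1 : Nat):Int) by omega]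
        rw [ih (l+1) (r-1) (by omega) (by omega)]
        rw [pvCore_decomp arr l r hlr hr, hab]
        simp [List.reverse_append]
      · rw [if_pos (by simp [hab])]
        have : ¬ (pvCore arr l r = (pvCore arr l r).reverse) := by
          rw [pvCore_decomp arr l r hlr hr]
          simp [List.reverse_append]
          intro h; exact absurd h hab
        simp [this]
    · rw [isPalindromeA, if_neg (by exact_mod_cast hlr)]
      have h1 : (pvCore arr l r).length ≤ 1 := by rw [pvCore_length arr l r hr]; omega
      simp [← short_pal _ h1]

lemma slice_one_neg_one (t : List Char) :
    PySem.List.slice t (some 1) (some (-1)) = t.tail.dropLast := by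
  cases t with
  | nil => decide
  | cons a u =>
    simp [PySem.List.slice, PySem.List.clampIdx, List.dropLast_eq_take]
    split_ifs <;> omega

lemma checkB_eq (t : List Char) : checkB t = decide (t = t.reverse) := by
  simp [checkB, PySem.List.slice?_none_none_neg_one]
  exact Bool.beq_eq_decide_eq t t.reverse

lemma pvCore_tail (arr : List Char) (l r : Nat) (h : l < r) (hr : r < arr.length) :
    pvCore arr (l + 1) r = pvCore arr (l + 1) (r - 1) ++ [arr[r]] := by
  unfold pvCore
  have h1 : r + 1 - (l + 1) = (r - l - 1) + 1 := by omega
  rw [h1, List.take_add_one, drop_get arr (l+1) (r-l-1) r (by omega) hr]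
  have h2 : r - 1 + 1 - (l + 1) = r - l - 1 := by omega
  simp [h2]

lemma pvCore_dropLast (arr : List Char) (l r : Nat) (h : l < r) (hr : r < arr.length) :
    pvCore arr l (r - 1) = arr[l] :: pvCore arr (l + 1) (r - 1) := by
  unfold pvCore
  have h1 : r - 1 + 1 - l = (r - 1 + 1 - (l + 1)) + 1 := by omega
  rw [List.drop_eq_getElem_cons (show l < arr.length by omega), h1, List.take_succ_cons]

lemma loop_base (arr : List Char) (l r : Nat) (hlr : ¬ l < r) (hr : r < arr.length) :
    solutionLoopA arr l r = pvFinishB (peelB (pvCore arr l r)) := by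
  rw [solutionLoopA, if_neg (by exact_mod_cast (show ¬ (l:Int) < r by omega))]
  have h1 : (pvCore arr l r).length ≤ 1 := by rw [pvCore_length arr l r hr]; omega
  rw [peelB, if_neg (by rintro ⟨h2, -⟩; omega)]
  rw [pvFinishB, if_pos h1]

lemma loop_eq (arr : List Char) : ∀ (m l r : Nat), r + 1 - l ≤ m → r < arr.length →
    solutionLoopA arr l r = pvFinishB (peelB (pvCore arr l r)) := by
  intro m
  induction m with
  | zero => intro l r hm hr; exact loop_base arr l r (by omega) hr
  | succ m ih =>
    intro l r hm hr
    by_cases hlr : l < r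
    · have hdec := pvCore_decomp arr l r hlr hr
      rw [solutionLoopA, if_pos (by exact_mod_cast hlr)]
      rw [getA arr l (by omega), getA arr r hr]
      have hget0 : PySem.List.pyGet? (pvCore arr l r) 0 = some arr[l] := by
        rw [hdec]; exact PySem.List.pyGet?_zero_cons _ _
      have hgetm1 : PySem.List.pyGet? (pvCore arr l r) (-1) = some arr[r] := by
        rw [hdec, PySem.List.pyGet?_neg_one,
          show arr[l] :: (pvCore arr (l+1) (r-1) ++ [arr[r]]) = (arr[l] :: pvCore arr (l+1) (r-1)) ++ [arr[r]] from rfl,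
          List.getLast?_concat]
      have hslice : PySem.List.slice (pvCore arr l r) (some 1) (some (-1)) = pvCore arr (l+1) (r-1) := by
        rw [slice_one_neg_one, hdec, List.tail_cons, List.dropLast_concat]
      by_cases hab : arr[l] = arr[r]
      · have hpeel : peelB (pvCore arr l r) = peelB (pvCore arr (l+1) (r-1)) := by
          conv_lhs => rw [peelB]
          rw [if_pos ⟨by rw [pvCore_length arr l r hr]; omega, by rw [hget0, hgetm1, hab]⟩, hslice]
        rw [if_neg (by simp [hab]), show (l:Int) + 1 = ((l+1 : Nat):Int) by omega,
          show (r:Int) - 1 = ((r-1 : Nat):Int) by omega,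
          ih (l+1) (r-1) (by omega) (by omega), hpeel]
      · have hpeel : peelB (pvCore arr l r) = pvCore arr l r := by
          rw [peelB, if_neg (by rintro ⟨-, h2⟩; rw [hget0, hgetm1] at h2; exact hab (Option.some.inj h2))]
        have htail : (pvCore arr l r).tail = pvCore arr (l+1) r := by
          rw [hdec, List.tail_cons, ← pvCore_tail arr l r hlr hr]
        have hdl : (pvCore arr l r).dropLast = pvCore arr l (r-1) := by
          rw [hdec, pvCore_dropLast arr l r hlr hr,
            show arr[l] :: (pvCore arr (l+1) (r-1) ++ [arr[r]]) = (arr[l] :: pvCore arr (l+1) (r-1)) ++ [arr[r]] from rfl,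
            List.dropLast_concat]
        have hrhs : pvFinishB (peelB (pvCore arr l r)) =
            if (decide (pvCore arr (l+1) r = (pvCore arr (l+1) r).reverse) ||
                decide (pvCore arr l (r-1) = (pvCore arr l (r-1)).reverse)) then 1 else 2 := by
          rw [hpeel, pvFinishB,
            if_neg (show ¬((pvCore arr l r).length ≤ 1) by rw [pvCore_length arr l r hr]; omega),
            PySem.List.slice_from_one, PySem.List.slice_to_neg_one,
            htail, hdl, checkB_eq, checkB_eq]
        rw [if_pos (show some arr[l] ≠ some arr[r] from fun h => hab (Option.some.inj h)),
          show (l:Int) + 1 = ((l+1 : Nat):Int) by omega,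
          show (r:Int) - 1 = ((r-1 : Nat):Int) by omega,
          pal_eq arr (r + 1 - l) (l+1) r (by omega) hr,
          pal_eq arr (r + 1 - l) l (r-1) (by omega) (by omega), hrhs]
    · exact loop_base arr l r hlr hr

-- ===== VERDICT (by name: the statement is the Claim_ definition above) =====
theorem solution_spec : Claim_equal_solution := by
  intro s _
  show solution s = solution_alt s
  unfold solution solution_alt
  generalize s.toList = arr
  cases arr with
  | nil =>
    rw [solutionLoopA, if_neg (by norm_num)]
    have hp : peelB ([] : List Char) = [] := by rw [peelB, if_neg (by simp)]
    rw [hp]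
    simp
  | cons a u =>
    have hr : (a::u).length - 1 < (a::u).length := by simp
    rw [show ((a::u).length : Int) - 1 = (((a::u).length - 1 : Nat) : Int) by omega,
      show (0:Int) = ((0:Nat):Int) from rfl,
      loop_eq (a::u) (a::u).length 0 ((a::u).length - 1) (by omega) hr]
    have hcore : pvCore (a::u) 0 ((a::u).length - 1) = a :: u := by
      unfold pvCore
      rw [List.drop_zero, show (a::u).length - 1 + 1 - 0 = (a::u).length by simp, List.take_length]
    rw [hcore]
    rfl
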